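-- pv_equiv track=rewrite | github.com/marshomics/profinder | profinder/pipeline.py | _extract_gene_id
-- ===== SOURCE A (Python) =====
-- def _extract_gene_id(attributes: str) -> str:
--     """Extract a gene identifier from GFF attribute string.
--
--     Tries, in order: ID=, locus_tag=, gene=, Name= (stripping any
--     trailing ' gene' or ' CDS' suffix from Geneious-style names).
--     """
--     for key in ("ID=", "locus_tag=", "gene=", "Name="):
--         for attr in attributes.split(";"):
--             if attr.startswith(key):
--                 val = attr[len(key):]
--                 # Geneious appends " gene" or " CDS" to Name values
--                 for suffix in (" gene", " CDS"):
--                     if val.endswith(suffix):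
--                         val = val[:-len(suffix)]
--                 return val
--     return ""
-- ===== SOURCE B (Python) =====
-- def _extract_gene_id(attributes: str) -> str:
--     """Extract a gene identifier from GFF attribute string.
--
--     Single pass: index every attribute by its key (text before the first
--     '='), keeping the first occurrence of each key, then look the priority
--     keys up in the index.
--     """
--     index = {}
--     for attr in attributes.split(";"):
--         i = attr.find("=")
--         if i != -1 and attr[:i] not in index:
--             index[attr[:i]] = attr[i + 1:]
--     for key in ("ID", "locus_tag", "gene", "Name"):
--         if key in index:
--             val = index[key]
--             # Geneious appends " gene" or " CDS" to Name values
--             for suffix in (" gene", " CDS"):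
--                 if val.endswith(suffix):
--                     val = val[: -len(suffix)]
--             return val
--     return ""
-- ===== Notes on version B (the rewrite author's own statement) =====
-- stated objective: alternative
-- what changed: A rescans the semicolon-split attribute list once per priority key using startswith; B makes one indexing pass that splits each attribute at its first equals sign into a key-to-value dict (keeping first occurrences) and then looks the four priority keys up.
import Mathlib
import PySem

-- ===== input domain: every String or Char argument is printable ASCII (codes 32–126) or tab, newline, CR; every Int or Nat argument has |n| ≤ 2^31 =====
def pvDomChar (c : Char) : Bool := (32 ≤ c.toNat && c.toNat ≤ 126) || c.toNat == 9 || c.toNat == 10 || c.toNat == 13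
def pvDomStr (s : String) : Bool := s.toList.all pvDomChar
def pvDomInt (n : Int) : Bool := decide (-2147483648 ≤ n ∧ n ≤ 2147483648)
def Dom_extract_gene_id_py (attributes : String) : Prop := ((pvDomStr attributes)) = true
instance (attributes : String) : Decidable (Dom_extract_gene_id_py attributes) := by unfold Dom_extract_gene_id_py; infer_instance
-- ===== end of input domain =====

-- B replaces A's per-key rescans of the split attributes by one pass that indexes
-- every attribute by its key (first '='), then looks the priority keys up (objective: alternative).

-- ===== PORT A =====
-- the sequential " gene" / " CDS" suffix stripping applied at a hit
def pvStripA (val : String) : String :=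
  let val1 := if PySem.Str.endswith val " gene" then PySem.Str.slice val none (some (-5)) else val
  if PySem.Str.endswith val1 " CDS" then PySem.Str.slice val1 none (some (-4)) else val1

-- inner loop: first attribute starting with `key`, returned stripped
def pvScanA (key : String) : List String → Option String
  | [] => none
  | attr :: rest =>
    if PySem.Str.startswith attr key then
      some (pvStripA (PySem.Str.slice attr (some (PySem.Str.len key)) none))
    else pvScanA key rest

-- outer loop over the priority keys; attributes re-split per key as in A
def pvKeysA (attributes : String) : List String → String
  | [] => ""
  | key :: ks =>
    match pvScanA key ((PySem.Str.split? attributes ";").getD []) with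
    | some v => v
    | none => pvKeysA attributes ks

-- split? is always `some` here since the separator ";" is nonempty
def extract_gene_id_py (attributes : String) : String :=
  pvKeysA attributes ["ID=", "locus_tag=", "gene=", "Name="]

-- ===== PORT B =====
def pvStripB (val : String) : String :=
  let val1 := if PySem.Str.endswith val " gene" then PySem.Str.slice val none (some (-5)) else val
  if PySem.Str.endswith val1 " CDS" then PySem.Str.slice val1 none (some (-4)) else val1

-- one indexing step: i = attr.find("="); if i != -1 and attr[:i] not in index: index[attr[:i]] = attr[i+1:]
def pvStepB (d : PySem.Dict String String) (attr : String) : PySem.Dict String String :=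
  let i := PySem.Str.find attr "="
  if i ≠ -1 ∧ d.contains (PySem.Str.slice attr none (some i)) = false then
    d.insert (PySem.Str.slice attr none (some i)) (PySem.Str.slice attr (some (i + 1)) none)
  else d

def pvIndexB (attributes : String) : PySem.Dict String String :=
  ((PySem.Str.split? attributes ";").getD []).foldl pvStepB PySem.Dict.empty

def pvLookupB (d : PySem.Dict String String) : List String → String
  | [] => ""
  | key :: ks =>
    match d.get? key with
    | some v => pvStripB v
    | none => pvLookupB d ks

def extract_gene_id_py_alt (attributes : String) : String :=
  pvLookupB (pvIndexB attributes) ["ID", "locus_tag", "gene", "Name"]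

-- ===== PRECONDITION & SPEC =====
def Spec_extract_gene_id_py (attributes : String) (out : String) : Prop := out = extract_gene_id_py_alt attributes
instance (attributes : String) (out : String) : Decidable (Spec_extract_gene_id_py attributes out) := by unfold Spec_extract_gene_id_py; infer_instance

-- ===== CLAIM (what is proved, stated in full; the proofs are below) =====
def Claim_equal_extract_gene_id_py : Prop := ∀ (attributes : String), Dom_extract_gene_id_py attributes → Spec_extract_gene_id_py attributes (extract_gene_id_py attributes)

-- ===== LEMMAS AND PROOFS =====

-- the raw (unstripped) value of the first attribute starting with `k ++ "="`
def pvRaw (k : String) : List String → Option String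
  | [] => none
  | attr :: rest =>
    if PySem.Str.startswith attr (k ++ "=") then
      some (PySem.Str.slice attr (some (PySem.Str.len (k ++ "="))) none)
    else pvRaw k rest

def pvOr (o r : Option String) : Option String :=
  match o with
  | some v => some v
  | none => r

theorem pvScanA_eq_raw (k : String) (parts : List String) :
    pvScanA (k ++ "=") parts = (pvRaw k parts).map pvStripA := by
  induction parts with
  | nil => rfl
  | cons attr rest ih =>
    simp only [pvScanA, pvRaw]
    split_ifs <;> simp [ih]

theorem pv_no_eq_not_start (k attr : String) (h : PySem.Str.find attr "=" = -1) :
    PySem.Str.startswith attr (k ++ "=") = false := by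
  rw [PySem.Str.find_eq] at h
  have hnin : ¬ (['='] <:+: attr.toList) := by
    simpa using (PySem.Chars.find_eq_neg_one_iff attr.toList ("=" : String).toList).mp h
  rw [PySem.Str.startswith_eq, Bool.eq_false_iff]
  intro hs
  have hpre : k.toList ++ ['='] <+: attr.toList := by
    simpa using (PySem.Chars.startswith_iff _ _).mp hs
  obtain ⟨t, ht⟩ := hpre
  exact hnin ⟨k.toList, t, by simpa [List.append_assoc] using ht⟩

theorem pv_start_iff (k attr : String) (hk : ('=' : Char) ∉ k.toList)
    (h : 0 ≤ PySem.Str.find attr "=") :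
    PySem.Str.startswith attr (k ++ "=") = true ↔
      PySem.Str.slice attr none (some (PySem.Str.find attr "=")) = k := by
  have hfind : PySem.Str.find attr "=" = PySem.Chars.find attr.toList ['='] :=
    PySem.Str.find_eq attr "="
  have h0 : 0 ≤ PySem.Chars.find attr.toList ['='] := hfind ▸ h
  have hspec := PySem.Chars.find_spec h0
  obtain ⟨u, hu⟩ := hspec.1
  have hslice : (PySem.Str.slice attr none (some (PySem.Str.find attr "="))).toList
      = attr.toList.take (PySem.Chars.find attr.toList ['=']).toNat := by
    rw [PySem.Str.toList_slice, PySem.Chars.slice_eq_listSlice, hfind]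
    exact PySem.List.slice_to attr.toList h0
  constructor
  · intro hsw
    have hsw' : (k ++ "=" : String).toList <+: attr.toList := by
      rw [PySem.Str.startswith_eq] at hsw
      exact (PySem.Chars.startswith_iff _ _).mp hsw
    have hpre : k.toList ++ ['='] <+: attr.toList := by simpa using hsw'
    obtain ⟨t, ht⟩ := hpre
    have ht' : k.toList ++ '=' :: t = attr.toList := by simpa [List.append_assoc] using ht
    have hlen : (PySem.Chars.find attr.toList ['=']).toNat = k.toList.length := by
      rcases Nat.lt_trichotomy (PySem.Chars.find attr.toList ['=']).toNat k.toList.length with hlt | heq | hgt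
      · exfalso
        have hdropGen : ∀ n, n ≤ k.toList.length →
            attr.toList.drop n = k.toList.drop n ++ '=' :: t := by
          intro n hn
          conv_lhs => rw [← ht']
          exact List.drop_append_of_le_length hn
        have hdrop := hdropGen (PySem.Chars.find attr.toList ['=']).toNat (Nat.le_of_lt hlt)
        cases hd : k.toList.drop (PySem.Chars.find attr.toList ['=']).toNat with
        | nil =>
          have hl0 : k.toList.length - (PySem.Chars.find attr.toList ['=']).toNat = 0 := by
            simpa using congrArg List.length hd
          omega
        | cons c cs =>
          have hcu : c :: (cs ++ '=' :: t) = '=' :: u := by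
            rw [← List.cons_append, ← hd, ← hdrop, ← hu]
            rfl
          have hc : c = '=' := (List.cons.injEq _ _ _ _ ▸ hcu).1
          have hcmem : c ∈ k.toList :=
            List.mem_of_mem_drop (by rw [hd]; exact List.mem_cons_self)
          exact hk (hc ▸ hcmem)
      · exact heq
      · exfalso
        apply hspec.2 k.toList.length hgt
        rw [← ht', List.drop_left]
        exact ⟨t, rfl⟩
    apply String.toList_inj.mp
    rw [hslice, hlen, ← ht', List.take_left]
  · intro hkey
    have htake : attr.toList.take (PySem.Chars.find attr.toList ['=']).toNat = k.toList := by
      rw [← hslice, hkey]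
    rw [PySem.Str.startswith_eq]
    apply (PySem.Chars.startswith_iff _ _).mpr
    have hl : ((k ++ "=") : String).toList = k.toList ++ ['='] := by simp
    rw [hl]
    refine ⟨u, ?_⟩
    calc (k.toList ++ ['=']) ++ u = k.toList ++ '=' :: u := by simp
    _ = attr.toList.take (PySem.Chars.find attr.toList ['=']).toNat
          ++ attr.toList.drop (PySem.Chars.find attr.toList ['=']).toNat := by rw [htake, ← hu]; rfl
    _ = attr.toList := List.take_append_drop _ _

theorem pv_val_eq (k attr : String) (h : 0 ≤ PySem.Str.find attr "=")
    (hkey : PySem.Str.slice attr none (some (PySem.Str.find attr "=")) = k) :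
    PySem.Str.slice attr (some (PySem.Str.find attr "=" + 1)) none =
      PySem.Str.slice attr (some (PySem.Str.len (k ++ "="))) none := by
  have hfind : PySem.Str.find attr "=" = PySem.Chars.find attr.toList ['='] :=
    PySem.Str.find_eq attr "="
  have h0 : 0 ≤ PySem.Chars.find attr.toList ['='] := hfind ▸ h
  have hle : PySem.Chars.find attr.toList ['='] ≤ (attr.toList.length : Int) :=
    PySem.Chars.find_le_length attr.toList ['=']
  have hslice : (PySem.Str.slice attr none (some (PySem.Str.find attr "="))).toList
      = attr.toList.take (PySem.Chars.find attr.toList ['=']).toNat := by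
    rw [PySem.Str.toList_slice, PySem.Chars.slice_eq_listSlice, hfind]
    exact PySem.List.slice_to attr.toList h0
  have hlen : (PySem.Chars.find attr.toList ['=']).toNat = k.toList.length := by
    have := congrArg (fun s => s.toList.length) hkey
    simp only [hslice, List.length_take] at this
    omega
  have hlen2 : PySem.Str.len (k ++ "=") = PySem.Str.find attr "=" + 1 := by
    rw [PySem.Str.len_eq, hfind]
    have : ((k ++ "=") : String).toList = k.toList ++ ['='] := by simp
    rw [this]
    simp only [List.length_append, List.length_cons, List.length_nil]
    omega
  rw [hlen2]

theorem pvRaw_cons (k attr : String) (rest : List String) :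
    pvRaw k (attr :: rest) = if PySem.Str.startswith attr (k ++ "=") then
      some (PySem.Str.slice attr (some (PySem.Str.len (k ++ "="))) none)
    else pvRaw k rest := rfl

theorem pv_foldl_get (k : String) (hk : ('=' : Char) ∉ k.toList) :
    ∀ (parts : List String) (d : PySem.Dict String String),
      (parts.foldl pvStepB d).get? k = pvOr (d.get? k) (pvRaw k parts) := by
  intro parts
  induction parts with
  | nil => intro d; cases hget : d.get? k <;> simp [pvOr, pvRaw, hget]
  | cons attr rest ih =>
    intro d
    rw [List.foldl_cons, ih (pvStepB d attr)]
    by_cases hneg : PySem.Str.find attr "=" = -1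
    · have hsw := pv_no_eq_not_start k attr hneg
      have hstep : pvStepB d attr = d := by
        simp only [pvStepB]
        rw [if_neg (by intro hcond; exact hcond.1 hneg)]
      rw [hstep, pvRaw_cons, if_neg (by rw [hsw]; decide)]
    · have hge : -1 ≤ PySem.Str.find attr "=" := by
        rw [PySem.Str.find_eq]
        exact PySem.Chars.neg_one_le_find attr.toList ("=" : String).toList
      have h0 : 0 ≤ PySem.Str.find attr "=" := by omega
      by_cases hsw : PySem.Str.startswith attr (k ++ "=") = true
      · have hkey := (pv_start_iff k attr hk h0).mp hsw
        by_cases hc : d.contains k = false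
        · have hgn : d.get? k = none := (PySem.Dict.get?_eq_none_iff_contains d k).mpr hc
          have hset : pvStepB d attr
              = d.insert k (PySem.Str.slice attr (some (PySem.Str.find attr "=" + 1)) none) := by
            simp only [pvStepB, hkey]
            rw [if_pos ⟨hneg, hc⟩]
          rw [hset, PySem.Dict.get?_insert_self, hgn, pvRaw_cons, if_pos hsw,
            pv_val_eq k attr h0 hkey]
          rfl
        · have hct : d.contains k = true := by
            cases hcc : d.contains k with
            | false => exact absurd hcc hc
            | true => rfl
          have hgs : d.get? k ≠ none := by
            intro hnone
            have hcf := (PySem.Dict.get?_eq_none_iff_contains d k).mp hnone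
            rw [hct] at hcf
            exact absurd hcf (by decide)
          have hstep : pvStepB d attr = d := by
            simp only [pvStepB, hkey]
            rw [if_neg (by intro hcond; rw [hct] at hcond; exact absurd hcond.2 (by decide))]
          cases hget : d.get? k with
          | none => exact absurd hget hgs
          | some v => rw [hstep, hget]; rfl
      · have hswf : PySem.Str.startswith attr (k ++ "=") = false := by
          cases hb : PySem.Str.startswith attr (k ++ "=") with
          | false => rfl
          | true => exact absurd hb hsw
        have hkne : PySem.Str.slice attr none (some (PySem.Str.find attr "=")) ≠ k :=
          fun he => hsw ((pv_start_iff k attr hk h0).mpr he)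
        have hstep : (pvStepB d attr).get? k = d.get? k := by
          simp only [pvStepB]
          split_ifs with hcond
          · exact PySem.Dict.get?_insert_of_ne d _ (Ne.symm hkne)
          · rfl
        rw [hstep, pvRaw_cons, if_neg (by rw [hswf]; decide)]

theorem pv_keys_eq (attributes : String) :
    ∀ (ks : List String), (∀ k ∈ ks, ('=' : Char) ∉ k.toList) →
      pvKeysA attributes (ks.map (· ++ "=")) = pvLookupB (pvIndexB attributes) ks := by
  intro ks
  induction ks with
  | nil => intro _; rfl
  | cons k ks ih =>
    intro h
    have hk : ('=' : Char) ∉ k.toList := h k (by simp)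
    simp only [List.map_cons, pvKeysA, pvLookupB]
    rw [pvScanA_eq_raw]
    have hget : (pvIndexB attributes).get? k =
        pvRaw k ((PySem.Str.split? attributes ";").getD []) := by
      rw [pvIndexB, pv_foldl_get k hk]
      rfl
    rw [hget]
    cases pvRaw k ((PySem.Str.split? attributes ";").getD []) with
    | none => exact ih (fun k' hk' => h k' (by simp [hk']))
    | some v => rfl

-- ===== VERDICT (by name: the statement is the Claim_ definition above) =====
theorem extract_gene_id_py_spec : Claim_equal_extract_gene_id_py := by
  intro attributes _
  show extract_gene_id_py attributes = extract_gene_id_py_alt attributes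
  have h := pv_keys_eq attributes ["ID", "locus_tag", "gene", "Name"] (by decide)
  exact h
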